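-- pv_equiv track=rewrite | github.com/insdout/Algorithms-and-DS | Course_1/edist.py | edistance_substring2
-- ===== SOURCE A (Python) =====
-- import math
--
-- def edistance_substring2(A, B):
--     n = len(A)
--     m = len(B)
--     D = [[math.inf for _ in range(m+1)] for _ in range(n+1)]
--     for i in range(0, n + 1):
--         for j in range(0, m+1):
--             if i == 0:
--                 D[i][j] = j
--             elif j == 0:
--                 D[i][j] = 0
--             elif A[i-1] == B[j-1]:
--                 D[i][j] = D[i-1][j-1]
--             else:
--                 D[i][j] = 1 + min(D[i-1][j], D[i][j-1], D[i-1][j-1])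
--
--     return D[-1][-1]
-- ===== SOURCE B (Python) =====
-- def edistance_substring2(A, B):
--     memo = {}
--
--     def rec(i, j):
--         got = memo.get((i, j))
--         if got is not None:
--             return got
--         if i == 0:
--             v = j
--         elif j == 0:
--             v = 0
--         elif A[i - 1] == B[j - 1]:
--             v = rec(i - 1, j - 1)
--         else:
--             v = 1 + min(rec(i - 1, j), rec(i, j - 1), rec(i - 1, j - 1))
--         memo[(i, j)] = v
--         return v
--
--     return rec(len(A), len(B))
-- ===== Notes on version B (the rewrite author's own statement) =====
-- stated objective: alternative
-- what changed: Replaces A's eagerly-filled dense (n+1)x(m+1) bottom-up table with top-down memoized recursion on (i, j) using a dict of lazily computed subproblems.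
import Mathlib
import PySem

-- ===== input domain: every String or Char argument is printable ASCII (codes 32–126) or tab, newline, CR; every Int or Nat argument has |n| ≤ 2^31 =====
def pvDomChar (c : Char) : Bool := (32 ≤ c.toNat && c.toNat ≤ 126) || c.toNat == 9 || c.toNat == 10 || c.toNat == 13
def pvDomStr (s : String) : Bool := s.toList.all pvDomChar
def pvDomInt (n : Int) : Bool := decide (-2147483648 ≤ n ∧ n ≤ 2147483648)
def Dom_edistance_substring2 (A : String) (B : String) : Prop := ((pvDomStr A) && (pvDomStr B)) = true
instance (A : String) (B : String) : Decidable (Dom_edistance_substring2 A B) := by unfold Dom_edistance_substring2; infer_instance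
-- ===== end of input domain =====

-- B replaces A's eagerly-filled dense (n+1)×(m+1) table by lazily memoized top-down
-- recursion on (i, j) (objective: alternative decomposition of the same recurrence).

-- ===== PORT A =====
-- D[i][j] read / write (indices are always in range in A's loops)
def pvGet2 (D : List (List Int)) (i j : Nat) : Int := (D.getD i []).getD j 0

def pvSet2 (D : List (List Int)) (i j : Nat) (v : Int) : List (List Int) :=
  D.set i ((D.getD i []).set j v)

-- the body of A's inner loop: the value assigned to D[i][j]
def pvCellA (as bs : List Char) (D : List (List Int)) (i j : Nat) : Int :=
  if i = 0 then (j : Int)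
  else if j = 0 then 0
  else if as.getD (i - 1) ' ' = bs.getD (j - 1) ' ' then pvGet2 D (i - 1) (j - 1)
  else 1 + min (min (pvGet2 D (i - 1) j) (pvGet2 D i (j - 1))) (pvGet2 D (i - 1) (j - 1))

-- literal port of A: build the full table, then return D[-1][-1] (= D[len-1][len-1]).
-- math.inf is only an initial sentinel that is never read back before being
-- overwritten; it is represented by 0 here.
def edistance_substring2 (A : String) (B : String) : Int :=
  let as := A.toList
  let bs := B.toList
  let n := as.length
  let m := bs.length
  let D0 := List.replicate (n + 1) (List.replicate (m + 1) (0 : Int))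
  let D := (List.range (n + 1)).foldl
    (fun D i => (List.range (m + 1)).foldl (fun D j => pvSet2 D i j (pvCellA as bs D i j)) D) D0
  pvGet2 D (D.length - 1) ((D.getD (D.length - 1) []).length - 1)

-- ===== PORT B =====
-- memoized top-down recursion; the memo dict is threaded through explicitly
def pvRec (as bs : List Char) (i j : Nat) (memo : PySem.Dict (Nat × Nat) Int) :
    Int × PySem.Dict (Nat × Nat) Int :=
  match memo.get? (i, j) with
  | some v => (v, memo)
  | none =>
    let r : Int × PySem.Dict (Nat × Nat) Int :=
      match i, j with
      | 0, j => ((j : Int), memo)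
      | _ + 1, 0 => ((0 : Int), memo)
      | i' + 1, j' + 1 =>
        if as.getD i' ' ' = bs.getD j' ' ' then pvRec as bs i' j' memo
        else
          let p1 := pvRec as bs i' (j' + 1) memo
          let p2 := pvRec as bs (i' + 1) j' p1.2
          let p3 := pvRec as bs i' j' p2.2
          (1 + min (min p1.1 p2.1) p3.1, p3.2)
    (r.1, r.2.insert (i, j) r.1)
termination_by (i, j)

def edistance_substring2_alt (A : String) (B : String) : Int :=
  (pvRec A.toList B.toList A.toList.length B.toList.length PySem.Dict.empty).1

-- ===== PRECONDITION & SPEC =====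
def Spec_edistance_substring2 (A : String) (B : String) (out : Int) : Prop := out = edistance_substring2_alt A B
instance (A : String) (B : String) (out : Int) : Decidable (Spec_edistance_substring2 A B out) := by unfold Spec_edistance_substring2; infer_instance

-- ===== CLAIM (what is proved, stated in full; the proofs are below) =====
def Claim_equal_edistance_substring2 : Prop := ∀ (A : String) (B : String), Dom_edistance_substring2 A B → Spec_edistance_substring2 A B (edistance_substring2 A B)

-- ===== LEMMAS AND PROOFS =====

-- reference recurrence: the substring edit distance both programs compute
def pvEd (as bs : List Char) : Nat → Nat → Int
  | 0, j => (j : Int)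
  | _ + 1, 0 => 0
  | i + 1, j + 1 =>
    if as.getD i ' ' = bs.getD j ' ' then pvEd as bs i j
    else 1 + min (min (pvEd as bs i (j + 1)) (pvEd as bs (i + 1) j)) (pvEd as bs i j)
termination_by i j => (i, j)

-- the table A has built after finishing rows < i and, in row i, cells < jcut
def pvTab (as bs : List Char) (n m i jcut : Nat) : List (List Int) :=
  (List.range (n + 1)).map fun a =>
    (List.range (m + 1)).map fun b =>
      if a < i ∨ (a = i ∧ b < jcut) then pvEd as bs a b else 0

theorem pvGetD_map_range {α : Type} (f : Nat → α) (N a : Nat) (d : α) (h : a < N) :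
    ((List.range N).map f).getD a d = f a := by
  simp [List.getD_eq_getElem?_getD, h]

theorem pvSet_map_range {α : Type} (f : Nat → α) (N a : Nat) (v : α) (_h : a < N) :
    ((List.range N).map f).set a v = (List.range N).map (fun x => if x = a then v else f x) := by
  apply List.ext_getElem
  · simp
  · intro i h1 h2
    simp only [List.getElem_set, List.getElem_map, List.getElem_range]
    simp only [List.length_set, List.length_map, List.length_range] at h1
    by_cases hia : a = i
    · simp [hia]
    · rw [if_neg hia, if_neg (fun hh => hia hh.symm)]

theorem pvTab_get2 (as bs : List Char) (n m i jcut a b : Nat) (ha : a ≤ n) (hb : b ≤ m) :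
    pvGet2 (pvTab as bs n m i jcut) a b =
      if a < i ∨ (a = i ∧ b < jcut) then pvEd as bs a b else 0 := by
  unfold pvGet2 pvTab
  rw [pvGetD_map_range _ _ _ _ (by omega), pvGetD_map_range _ _ _ _ (by omega)]

theorem pvCellA_tab (as bs : List Char) (n m i j : Nat) (hi : i ≤ n) (hj : j ≤ m) :
    pvCellA as bs (pvTab as bs n m i j) i j = pvEd as bs i j := by
  unfold pvCellA
  match i, j with
  | 0, j => simp [pvEd]
  | i' + 1, 0 => simp [pvEd]
  | i' + 1, j' + 1 =>
    rw [if_neg (by omega), if_neg (by omega)]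
    simp only [Nat.add_sub_cancel]
    by_cases hc : as.getD i' ' ' = bs.getD j' ' '
    · rw [if_pos hc, pvTab_get2 as bs n m _ _ i' j' (by omega) (by omega), if_pos (by omega)]
      conv_rhs => rw [pvEd]
      rw [if_pos hc]
    · rw [if_neg hc,
          pvTab_get2 as bs n m _ _ i' (j' + 1) (by omega) (by omega),
          pvTab_get2 as bs n m _ _ (i' + 1) j' (by omega) (by omega),
          pvTab_get2 as bs n m _ _ i' j' (by omega) (by omega)]
      rw [if_pos (by omega), if_pos (by omega), if_pos (by omega)]
      conv_rhs => rw [pvEd]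
      rw [if_neg hc]

theorem pvSet2_tab (as bs : List Char) (n m i j : Nat) (hi : i ≤ n) (hj : j ≤ m) :
    pvSet2 (pvTab as bs n m i j) i j (pvEd as bs i j) = pvTab as bs n m i (j + 1) := by
  unfold pvSet2 pvTab
  rw [pvGetD_map_range _ _ _ _ (by omega), pvSet_map_range _ _ _ _ (by omega),
      pvSet_map_range _ _ _ _ (by omega)]
  apply List.map_congr_left
  intro a ha
  rw [List.mem_range] at ha
  by_cases hai : a = i
  · subst hai
    rw [if_pos rfl]
    apply List.map_congr_left
    intro b hb
    rw [List.mem_range] at hb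
    by_cases hbj : b = j
    · subst hbj; rw [if_pos rfl, if_pos (by omega)]
    · rw [if_neg hbj]
      by_cases h : a < a ∨ (a = a ∧ b < j)
      · rw [if_pos h, if_pos (by omega)]
      · rw [if_neg h, if_neg (by omega)]
  · rw [if_neg hai]
    apply List.map_congr_left
    intro b _
    by_cases h : a < i ∨ (a = i ∧ b < j)
    · rw [if_pos h, if_pos (by omega)]
    · rw [if_neg h, if_neg (by omega)]

theorem pvTab_row_done (as bs : List Char) (n m i : Nat) :
    pvTab as bs n m i (m + 1) = pvTab as bs n m (i + 1) 0 := by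
  unfold pvTab
  apply List.map_congr_left
  intro a _
  apply List.map_congr_left
  intro b hb
  rw [List.mem_range] at hb
  by_cases h : a < i ∨ (a = i ∧ b < m + 1)
  · rw [if_pos h, if_pos (by omega)]
  · rw [if_neg h, if_neg (by omega)]

theorem pvInner_loop (as bs : List Char) (n m i : Nat) (hi : i ≤ n) :
    ∀ (c j0 : Nat), j0 + c = m + 1 →
      (List.range' j0 c).foldl (fun D j => pvSet2 D i j (pvCellA as bs D i j))
          (pvTab as bs n m i j0) = pvTab as bs n m i (m + 1) := by
  intro c
  induction c with
  | zero => intro j0 h; simp only [List.range', List.foldl_nil]; rw [show j0 = m + 1 by omega]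
  | succ c ih =>
    intro j0 h
    simp only [List.range'_succ, List.foldl_cons]
    rw [pvCellA_tab as bs n m i j0 hi (by omega), pvSet2_tab as bs n m i j0 hi (by omega)]
    exact ih (j0 + 1) (by omega)

theorem pvInner_loop' (as bs : List Char) (n m i : Nat) (hi : i ≤ n) :
    (List.range (m + 1)).foldl (fun D j => pvSet2 D i j (pvCellA as bs D i j))
        (pvTab as bs n m i 0) = pvTab as bs n m i (m + 1) := by
  rw [List.range_eq_range']
  exact pvInner_loop as bs n m i hi (m + 1) 0 (by omega)

theorem pvOuter_loop (as bs : List Char) (n m : Nat) :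
    ∀ (c i0 : Nat), i0 + c = n + 1 →
      (List.range' i0 c).foldl
          (fun D i => (List.range (m + 1)).foldl (fun D j => pvSet2 D i j (pvCellA as bs D i j)) D)
          (pvTab as bs n m i0 0) = pvTab as bs n m (n + 1) 0 := by
  intro c
  induction c with
  | zero => intro i0 h; simp only [List.range', List.foldl_nil]; rw [show i0 = n + 1 by omega]
  | succ c ih =>
    intro i0 h
    simp only [List.range'_succ, List.foldl_cons]
    rw [pvInner_loop' as bs n m i0 (by omega), pvTab_row_done]
    exact ih (i0 + 1) (by omega)

theorem pvOuter_loop' (as bs : List Char) (n m : Nat) :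
    (List.range (n + 1)).foldl
        (fun D i => (List.range (m + 1)).foldl (fun D j => pvSet2 D i j (pvCellA as bs D i j)) D)
        (pvTab as bs n m 0 0) = pvTab as bs n m (n + 1) 0 := by
  rw [show List.range (n + 1) = List.range' 0 (n + 1) from List.range_eq_range' ..]
  exact pvOuter_loop as bs n m (n + 1) 0 (by omega)

theorem pvTab_zero (as bs : List Char) (n m : Nat) :
    pvTab as bs n m 0 0 = List.replicate (n + 1) (List.replicate (m + 1) (0 : Int)) := by
  unfold pvTab
  rw [List.eq_replicate_iff]
  constructor
  · simp
  · intro row hrow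
    rw [List.mem_map] at hrow
    obtain ⟨a, _, hrow⟩ := hrow
    rw [← hrow, List.eq_replicate_iff]
    constructor
    · simp
    · intro x hx
      rw [List.mem_map] at hx
      obtain ⟨b, _, hx⟩ := hx
      rw [← hx, if_neg (by omega)]

theorem pvA_eq_ed (A B : String) :
    edistance_substring2 A B = pvEd A.toList B.toList A.toList.length B.toList.length := by
  simp only [edistance_substring2]
  rw [← pvTab_zero, pvOuter_loop' A.toList B.toList A.toList.length B.toList.length]
  have hlen : (pvTab A.toList B.toList A.toList.length B.toList.length
      (A.toList.length + 1) 0).length = A.toList.length + 1 := by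
    unfold pvTab; simp
  rw [hlen]
  have hrow : (pvTab A.toList B.toList A.toList.length B.toList.length
      (A.toList.length + 1) 0).getD (A.toList.length + 1 - 1) [] =
      (List.range (B.toList.length + 1)).map fun b =>
        if A.toList.length < A.toList.length + 1 ∨
            (A.toList.length = A.toList.length + 1 ∧ b < 0) then
          pvEd A.toList B.toList A.toList.length b else 0 := by
    unfold pvTab
    rw [Nat.add_sub_cancel, pvGetD_map_range _ _ _ _ (by omega)]
  rw [hrow]
  have hrlen : ((List.range (B.toList.length + 1)).map fun b =>
      if A.toList.length < A.toList.length + 1 ∨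
          (A.toList.length = A.toList.length + 1 ∧ b < 0) then
        pvEd A.toList B.toList A.toList.length b else 0).length = B.toList.length + 1 := by simp
  rw [hrlen]
  simp only [Nat.add_sub_cancel]
  rw [pvTab_get2 A.toList B.toList A.toList.length B.toList.length _ _ _ _ (by omega) (by omega),
      if_pos (by omega)]

-- invariant on the memo: every stored value is the edit-distance value of its key
def pvMemoOK (as bs : List Char) (memo : PySem.Dict (Nat × Nat) Int) : Prop :=
  ∀ p v, memo.get? p = some v → v = pvEd as bs p.1 p.2

theorem pvMemoOK_insert (as bs : List Char) (memo : PySem.Dict (Nat × Nat) Int)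
    (i j : Nat) (v : Int) (h : pvMemoOK as bs memo) (hv : v = pvEd as bs i j) :
    pvMemoOK as bs (memo.insert (i, j) v) := by
  intro p w hw
  rw [PySem.Dict.get?_insert] at hw
  split at hw
  · rename_i hp
    cases hw
    subst hp
    exact hv
  · exact h p w hw

theorem pvRec_ok (as bs : List Char) :
    ∀ (k i j : Nat) (memo : PySem.Dict (Nat × Nat) Int), i + j ≤ k → pvMemoOK as bs memo →
      (pvRec as bs i j memo).1 = pvEd as bs i j ∧ pvMemoOK as bs (pvRec as bs i j memo).2 := by
  intro k
  induction k with
  | zero =>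
    intro i j memo hk hm
    have hi : i = 0 := by omega
    have hj : j = 0 := by omega
    subst hi; subst hj
    rw [pvRec.eq_def]
    cases hg : memo.get? (0, 0) with
    | some v =>
      exact ⟨by simpa [pvEd] using hm (0, 0) v hg, hm⟩
    | none =>
      refine ⟨by rw [pvEd], ?_⟩
      exact pvMemoOK_insert as bs memo 0 0 _ hm (by rw [pvEd])
  | succ k ih =>
    intro i j memo hk hm
    rw [pvRec.eq_def]
    cases hg : memo.get? (i, j) with
    | some v =>
      exact ⟨hm (i, j) v hg, hm⟩
    | none =>
      match i, j with
      | 0, j =>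
        refine ⟨by rw [pvEd], ?_⟩
        exact pvMemoOK_insert as bs memo 0 j _ hm (by rw [pvEd])
      | i' + 1, 0 =>
        refine ⟨by rw [pvEd], ?_⟩
        exact pvMemoOK_insert as bs memo (i' + 1) 0 _ hm (by rw [pvEd])
      | i' + 1, j' + 1 =>
        by_cases hc : as.getD i' ' ' = bs.getD j' ' '
        · simp only [if_pos hc]
          obtain ⟨h1, h2⟩ := ih i' j' memo (by omega) hm
          refine ⟨by rw [h1, pvEd, if_pos hc], ?_⟩
          exact pvMemoOK_insert as bs _ (i' + 1) (j' + 1) _ h2 (by rw [h1, pvEd, if_pos hc])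
        · simp only [if_neg hc]
          obtain ⟨h1, m1⟩ := ih i' (j' + 1) memo (by omega) hm
          obtain ⟨h2, m2⟩ := ih (i' + 1) j' _ (by omega) m1
          obtain ⟨h3, m3⟩ := ih i' j' _ (by omega) m2
          have hv : 1 + min (min (pvRec as bs i' (j' + 1) memo).1
              (pvRec as bs (i' + 1) j' (pvRec as bs i' (j' + 1) memo).2).1)
              (pvRec as bs i' j'
                (pvRec as bs (i' + 1) j' (pvRec as bs i' (j' + 1) memo).2).2).1 =
              pvEd as bs (i' + 1) (j' + 1) := by
            rw [h1, h2, h3, pvEd, if_neg hc]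
          exact ⟨hv, pvMemoOK_insert as bs _ (i' + 1) (j' + 1) _ m3 hv⟩

theorem pvB_eq_ed (A B : String) :
    edistance_substring2_alt A B = pvEd A.toList B.toList A.toList.length B.toList.length := by
  unfold edistance_substring2_alt
  exact (pvRec_ok A.toList B.toList (A.toList.length + B.toList.length) _ _ PySem.Dict.empty
    (le_refl _) (by intro p v h; simp [PySem.Dict.get?_empty] at h)).1

-- ===== VERDICT (by name: the statement is the Claim_ definition above) =====
theorem edistance_substring2_spec : Claim_equal_edistance_substring2 := by
  intro A B _
  unfold Spec_edistance_substring2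
  rw [pvA_eq_ed, pvB_eq_ed]
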